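-- pv_equiv track=rewrite | github.com/farhapartex/code-ninja | Leetcode/string/rearrange-words-in-a-sentence.py | arrangeWords
-- ===== SOURCE A (Python) =====
-- def arrangeWords(text: str) -> str:
--     text = text.split()
--     data, res = {}, []
--     for txt in text:
--         if len(txt) not in data:
--             data[len(txt)] = [txt]
--         else:
--             data[len(txt)].append(txt)
--
--     keys = sorted(data.keys())
--     for key in keys:
--         res.extend(data[key])
--
--     return " ".join(res).capitalize()
-- ===== SOURCE B (Python) =====
-- def arrangeWords(text: str) -> str:
--     return " ".join(sorted(text.split(), key=len)).capitalize()
-- ===== Notes on version B (the rewrite author's own statement) =====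
-- stated objective: idiomatic
-- what changed: Replaces the length-keyed dict of buckets plus sorted-keys reassembly loop with a single stable sort by word length (sorted(words, key=len)) followed by join and capitalize.
import Mathlib
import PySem

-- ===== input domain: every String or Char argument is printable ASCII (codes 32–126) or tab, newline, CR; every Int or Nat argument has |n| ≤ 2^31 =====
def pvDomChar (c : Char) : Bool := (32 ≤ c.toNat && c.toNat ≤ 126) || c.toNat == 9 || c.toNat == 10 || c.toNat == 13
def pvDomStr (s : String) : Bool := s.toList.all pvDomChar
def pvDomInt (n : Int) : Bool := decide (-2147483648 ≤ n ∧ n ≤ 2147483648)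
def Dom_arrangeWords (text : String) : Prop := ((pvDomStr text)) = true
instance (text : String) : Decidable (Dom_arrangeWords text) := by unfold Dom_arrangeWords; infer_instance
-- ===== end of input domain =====

-- B replaces A's length-keyed dict of buckets and sorted-keys reassembly loop with one
-- stable sort by word length (same cost; more idiomatic).

-- shared helper: Python str.capitalize() (first char uppercased, the rest lowercased;
-- exact on the ASCII domain), used by both ports since both Pythons end with .capitalize()
def pyCapitalize (s : String) : String :=
  match s.toList with
  | [] => s
  | c :: t => String.ofList (PySem.Chars.upperChar c :: PySem.Chars.lower t)

-- ===== PORT A =====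
def arrangeWords (text : String) : String :=
  let ws := PySem.Str.split₀ text
  let data := ws.foldl (fun d txt =>
      if d.contains (PySem.Str.len txt) = false then d.insert (PySem.Str.len txt) [txt]
      else d.modify (PySem.Str.len txt) [] (fun b => b ++ [txt])) PySem.Dict.empty
  let keys := PySem.List.sorted data.keys (fun k => k) false
  let res := keys.foldl (fun res k => res ++ data.getD k []) ([] : List String)
  pyCapitalize (PySem.Str.join " " res)

-- ===== PORT B =====
def arrangeWords_alt (text : String) : String :=
  pyCapitalize (PySem.Str.join " "
    (PySem.List.sorted (PySem.Str.split₀ text) (fun w => PySem.Str.len w) false))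

-- ===== PRECONDITION & SPEC =====
def Spec_arrangeWords (text : String) (out : String) : Prop := out = arrangeWords_alt text
instance (text : String) (out : String) : Decidable (Spec_arrangeWords text out) := by unfold Spec_arrangeWords; infer_instance

-- ===== CLAIM (what is proved, stated in full; the proofs are below) =====
def Claim_equal_arrangeWords : Prop := ∀ (text : String), Dom_arrangeWords text → Spec_arrangeWords text (arrangeWords text)

-- ===== LEMMAS AND PROOFS =====

-- insertBy skips a prefix none of whose elements satisfy `before x ·`
lemma insertBy_append_not {α : Type} (before : α → α → Bool) (x : α) (as bs : List α)
    (h : ∀ a ∈ as, before x a = false) :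
    PySem.List.insertBy before x (as ++ bs) = as ++ PySem.List.insertBy before x bs := by
  induction as with
  | nil => simp
  | cons a as ih =>
    have ha : before x a = false := h a (by simp)
    simp [PySem.List.insertBy, ha, ih (fun a ha' => h a (by simp [ha']))]

-- insertBy puts x in front when every element is "after" x
lemma insertBy_all_before {α : Type} (before : α → α → Bool) (x : α) (l : List α)
    (h : ∀ y ∈ l, before x y = true) :
    PySem.List.insertBy before x l = x :: l := by
  cases l with
  | nil => simp [PySem.List.insertBy]
  | cons y t => simp [PySem.List.insertBy, h y (by simp)]

lemma flatMap_congr {α β : Type} (l : List α) (f g : α → List β)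
    (h : ∀ x ∈ l, f x = g x) : l.flatMap f = l.flatMap g := by
  induction l with
  | nil => rfl
  | cons x t ih =>
    simp only [List.flatMap_cons, h x (by simp), ih (fun y hy => h y (by simp [hy]))]

-- inserting a word whose length is an existing key appends it to the end of its bucket
lemma helper_mem (ks : List Int) (g : Int → List String) (n : Int) (w : String)
    (hks : ks.Pairwise (· < ·))
    (hg : ∀ k, ∀ x ∈ g k, PySem.Str.len x = k)
    (hw : PySem.Str.len w = n) (hn : n ∈ ks) :
    ks.flatMap (fun k => g k ++ if n == k then [w] else []) =
      PySem.List.insertBy (fun a b => decide (PySem.Str.len a < PySem.Str.len b)) w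
        (ks.flatMap g) := by
  induction ks with
  | nil => simp at hn
  | cons k ks ih =>
    have hk_lt : ∀ k' ∈ ks, k < k' := by
      intro k' hk'; exact (List.pairwise_cons.mp hks).1 k' hk'
    by_cases hk : n = k
    · subst hk
      have hnot : ∀ y ∈ g n, (decide (PySem.Str.len w < PySem.Str.len y)) = false := by
        intro y hy; rw [hw, hg n y hy]; simp
      have hrest : ∀ y ∈ ks.flatMap g,
          (decide (PySem.Str.len w < PySem.Str.len y)) = true := by
        intro y hy
        obtain ⟨k', hk', hy'⟩ := List.mem_flatMap.mp hy
        rw [hw, hg k' y hy']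
        simp
        exact hk_lt k' hk'
      have hifs : ∀ k' ∈ ks, (g k' ++ if n == k' then [w] else []) = g k' := by
        intro k' hk'
        have : n ≠ k' := by intro h; exact absurd (h ▸ hk_lt k' hk') (lt_irrefl n)
        simp [this]
      rw [List.flatMap_cons, List.flatMap_cons,
        flatMap_congr ks _ _ hifs,
        insertBy_append_not _ _ _ _ hnot,
        insertBy_all_before _ _ _ hrest]
      simp
    · have hn' : n ∈ ks := by cases hn with
        | head => exact absurd rfl hk
        | tail _ h => exact h
      have hkn : k < n := hk_lt n hn'
      have hnot : ∀ y ∈ g k, (decide (PySem.Str.len w < PySem.Str.len y)) = false := by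
        intro y hy
        rw [hw, hg k y hy]
        simp
        omega
      have hne : (n == k) = false := by simp [hk]
      rw [List.flatMap_cons, List.flatMap_cons, hne,
        insertBy_append_not _ _ _ _ hnot,
        ih (List.pairwise_cons.mp hks).2 hn']
      simp

-- inserting a word with a fresh length: the new key lands in sorted position and its
-- singleton bucket goes with it
lemma helper_new (ks : List Int) (g : Int → List String) (n : Int) (w : String)
    (hks : ks.Pairwise (· < ·))
    (hg : ∀ k, ∀ x ∈ g k, PySem.Str.len x = k)
    (hw : PySem.Str.len w = n) (hn : n ∉ ks) (hgn : g n = []) :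
    (PySem.List.insertBy (fun a b => decide (a < b)) n ks).flatMap
        (fun k => g k ++ if n == k then [w] else []) =
      PySem.List.insertBy (fun a b => decide (PySem.Str.len a < PySem.Str.len b)) w
        (ks.flatMap g) := by
  induction ks with
  | nil => simp [PySem.List.insertBy, hgn]
  | cons k ks ih =>
    have hk_lt : ∀ k' ∈ ks, k < k' := by
      intro k' hk'; exact (List.pairwise_cons.mp hks).1 k' hk'
    have hkn : n ≠ k := by intro h; exact hn (h ▸ List.mem_cons_self ..)
    by_cases hlt : n < k
    · have hall : ∀ y ∈ g k ++ ks.flatMap g,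
          (decide (PySem.Str.len w < PySem.Str.len y)) = true := by
        intro y hy
        rcases List.mem_append.mp hy with hy | hy
        · rw [hw, hg k y hy]; simp; exact hlt
        · obtain ⟨k', hk', hy'⟩ := List.mem_flatMap.mp hy
          rw [hw, hg k' y hy']
          simp
          exact lt_trans hlt (hk_lt k' hk')
      have hifs : ∀ k' ∈ k :: ks, (g k' ++ if n == k' then [w] else []) = g k' := by
        intro k' hk'
        have : n ≠ k' := by
          intro h; exact hn (h ▸ hk')
        simp [this]
      rw [PySem.List.insertBy, if_pos (by simpa using hlt), List.flatMap_cons,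
        flatMap_congr (k :: ks) _ _ hifs, List.flatMap_cons,
        insertBy_all_before _ _ _ hall]
      simp [hgn]
    · have hkn' : k < n := by omega
      have hnot : ∀ y ∈ g k, (decide (PySem.Str.len w < PySem.Str.len y)) = false := by
        intro y hy
        rw [hw, hg k y hy]
        simp
        omega
      have hne : (n == k) = false := by simp [hkn]
      have hn' : n ∉ ks := fun h => hn (List.mem_cons_of_mem _ h)
      rw [PySem.List.insertBy, if_neg (by simpa using hlt)]
      simp only [List.flatMap_cons, hne, if_neg Bool.false_ne_true, List.append_nil]
      rw [insertBy_append_not _ _ _ _ hnot,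
        ih (List.pairwise_cons.mp hks).2 hn']

-- bucket-and-reassemble equals the stable length sort
lemma flatten_eq_sorted (ws : List String) :
    (PySem.List.sorted (PySem.Set.ofList (ws.map PySem.Str.len)) (fun k => k) false).flatMap
        (fun k => ws.filter (fun w => PySem.Str.len w == k)) =
      PySem.List.sorted ws (fun w => PySem.Str.len w) false := by
  induction ws using List.reverseRecOn with
  | nil => rfl
  | append_singleton ws w ih =>
    have hofl : PySem.Set.ofList ((ws ++ [w]).map PySem.Str.len) =
        PySem.Set.add (PySem.Set.ofList (ws.map PySem.Str.len)) (PySem.Str.len w) := by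
      rw [PySem.Set.ofList_eq_foldl, PySem.Set.ofList_eq_foldl]
      simp [List.foldl_map]
    have hfilt : ∀ k : Int, (ws ++ [w]).filter (fun x => PySem.Str.len x == k) =
        ws.filter (fun x => PySem.Str.len x == k) ++
          (if PySem.Str.len w == k then [w] else []) := by
      intro k; rw [List.filter_append]
      cases hb : (PySem.Str.len w == k) <;>
        simp only [List.filter, PySem.Str.len] at hb ⊢ <;> rw [hb] <;> simp
    have hg : ∀ k : Int, ∀ x ∈ ws.filter (fun x => PySem.Str.len x == k),
        PySem.Str.len x = k := by
      intro k x hx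
      have := List.of_mem_filter hx
      simpa using this
    have hpw : (PySem.List.sorted (PySem.Set.ofList (ws.map PySem.Str.len))
        (fun k => k) false).Pairwise (· < ·) := PySem.List.sorted_ofList_pairwise_lt _
    rw [PySem.List.sorted_eq_foldl_insertBy (ws ++ [w]), List.foldl_append,
      ← PySem.List.sorted_eq_foldl_insertBy ws, ← ih]
    simp only [List.foldl_cons, List.foldl_nil]
    by_cases hn : PySem.Str.len w ∈ ws.map PySem.Str.len
    · have hadd : PySem.Set.ofList ((ws ++ [w]).map PySem.Str.len) =
          PySem.Set.ofList (ws.map PySem.Str.len) := by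
        rw [hofl, PySem.Set.add_of_mem ((PySem.Set.mem_ofList _ _).mpr hn)]
      rw [hadd]
      have hmem : PySem.Str.len w ∈ PySem.List.sorted
          (PySem.Set.ofList (ws.map PySem.Str.len)) (fun k => k) false := by
        rw [PySem.List.mem_sorted]; exact (PySem.Set.mem_ofList _ _).mpr hn
      rw [flatMap_congr _ _ _ (fun k _ => hfilt k)]
      exact helper_mem _ _ _ _ hpw hg rfl hmem
    · have hadd : PySem.Set.ofList ((ws ++ [w]).map PySem.Str.len) =
          PySem.Set.ofList (ws.map PySem.Str.len) ++ [PySem.Str.len w] := by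
        rw [hofl, PySem.Set.add_of_not_mem]
        intro h; exact hn ((PySem.Set.mem_ofList _ _).mp h)
      rw [hadd, PySem.List.sorted_eq_foldl_insertBy
            (PySem.Set.ofList (ws.map PySem.Str.len) ++ [PySem.Str.len w]),
        List.foldl_append, ← PySem.List.sorted_eq_foldl_insertBy]
      simp only [List.foldl_cons, List.foldl_nil]
      have hnmem : PySem.Str.len w ∉ PySem.List.sorted
          (PySem.Set.ofList (ws.map PySem.Str.len)) (fun k => k) false := by
        rw [PySem.List.mem_sorted]
        intro h; exact hn ((PySem.Set.mem_ofList _ _).mp h)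
      have hgn : ws.filter (fun x => PySem.Str.len x == PySem.Str.len w) = [] := by
        rw [List.filter_eq_nil_iff]
        intro x hx hlen
        exact hn (List.mem_map.mpr ⟨x, hx, by simpa using hlen.symm⟩)
      rw [flatMap_congr _ _ _ (fun k _ => hfilt k)]
      exact helper_new _ _ _ _ hpw hg rfl hnmem hgn

-- A's dict-building step is a single Dict.modify
lemma stepA_eq (d : PySem.Dict Int (List String)) (txt : String) :
    (if d.contains (PySem.Str.len txt) = false then d.insert (PySem.Str.len txt) [txt]
     else d.modify (PySem.Str.len txt) [] (fun b => b ++ [txt])) =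
      d.modify (PySem.Str.len txt) [] (fun b => b ++ [txt]) := by
  by_cases h : d.contains (PySem.Str.len txt) = false
  · rw [if_pos h]
    unfold PySem.Dict.modify
    rw [PySem.Dict.getD_of_not_contains _ _ h]
    rfl
  · rw [if_neg h]

-- ===== VERDICT (by name: the statement is the Claim_ definition above) =====
theorem arrangeWords_spec : Claim_equal_arrangeWords := by
  intro text _
  unfold Spec_arrangeWords arrangeWords arrangeWords_alt
  simp only
  congr 1
  congr 1
  set ws := PySem.Str.split₀ text with hws
  have hstep : (fun (d : PySem.Dict Int (List String)) txt =>
      if d.contains (PySem.Str.len txt) = false then d.insert (PySem.Str.len txt) [txt]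
      else d.modify (PySem.Str.len txt) [] (fun b => b ++ [txt])) =
      (fun d txt => d.modify (PySem.Str.len txt) [] (fun b => b ++ [txt])) := by
    funext d txt; exact stepA_eq d txt
  rw [hstep]
  have hfold : ws.foldl (fun d txt => d.modify (PySem.Str.len txt) [] (fun b => b ++ [txt]))
      PySem.Dict.empty =
      (ws.map (fun w => (PySem.Str.len w, w))).foldl
        (fun d p => d.modify p.1 [] (fun b => b ++ [p.2])) PySem.Dict.empty := by
    rw [List.foldl_map]
  have hkeys : (ws.foldl (fun d txt => d.modify (PySem.Str.len txt) [] (fun b => b ++ [txt]))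
      PySem.Dict.empty).keys = PySem.Set.ofList (ws.map PySem.Str.len) := by
    rw [PySem.Dict.keys_foldl_modify_key ws PySem.Str.len []
      (fun _ txt => (fun b => b ++ [txt]))]
    have : (PySem.Dict.empty : PySem.Dict Int (List String)).keys = [] := rfl
    rw [this]
    exact PySem.Set.update_empty _
  have hgetD : ∀ k, (ws.foldl (fun d txt =>
      d.modify (PySem.Str.len txt) [] (fun b => b ++ [txt])) PySem.Dict.empty).getD k [] =
      ws.filter (fun w => PySem.Str.len w == k) := by
    intro k
    rw [hfold, PySem.Dict.getD_foldl_modify_append]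
    simp [PySem.Dict.getD, PySem.Dict.get?, PySem.Dict.empty, List.filter_map,
      Function.comp_def]
  rw [PySem.List.foldl_append_eq_flatMap, hkeys]
  rw [flatMap_congr _ _ _ (fun k _ => hgetD k)]
  simpa using flatten_eq_sorted ws
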